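-- pv_equiv track=rewrite | github.com/ynwoo/baekjoon | 프로그래머스/unrated/133502. 햄버거 만들기/햄버거 만들기.py | solution
-- ===== SOURCE A (Python) =====
-- from collections import deque
--
-- def solution(ingredient):
--     answer = 0
--     stack = deque()
--     for item in ingredient:
--         stack.append(item)
--         if len(stack) >= 4 and stack[-4] == 1 and stack[-3] == 2 and stack[-2] == 3 and stack[-1] == 1:
--             stack.pop()
--             stack.pop()
--             stack.pop()
--             stack.pop()
--             answer += 1
--
--     return answer
-- ===== SOURCE B (Python) =====
-- def solution(ingredient):
--     # Fixed-point rewriting: repeatedly find the leftmost [1,2,3,1] window and delete it.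
--     lst = list(ingredient)
--     answer = 0
--     while True:
--         j = -1
--         for i in range(len(lst) - 3):
--             if lst[i:i + 4] == [1, 2, 3, 1]:
--                 j = i
--                 break
--         if j < 0:
--             return answer
--         del lst[j:j + 4]
--         answer += 1
-- ===== Notes on version B (the rewrite author's own statement) =====
-- stated objective: alternative
-- what changed: Replaces A's one-pass deque stack with a fixed-point rewriter that repeatedly scans the whole list for the leftmost [1,2,3,1] window and deletes it until no window remains.
import Mathlib
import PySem

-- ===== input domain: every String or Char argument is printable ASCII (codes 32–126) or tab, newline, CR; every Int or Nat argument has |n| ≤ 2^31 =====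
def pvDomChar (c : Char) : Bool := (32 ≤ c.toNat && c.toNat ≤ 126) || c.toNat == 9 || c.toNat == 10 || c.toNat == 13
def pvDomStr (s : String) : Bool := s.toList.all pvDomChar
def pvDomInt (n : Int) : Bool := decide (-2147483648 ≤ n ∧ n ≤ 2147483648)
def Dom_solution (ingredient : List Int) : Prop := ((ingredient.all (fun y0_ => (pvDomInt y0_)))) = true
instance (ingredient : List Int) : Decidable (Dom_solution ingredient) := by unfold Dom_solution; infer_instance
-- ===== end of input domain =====

-- B replaces A's one-pass deque stack by fixed-point removal of the leftmost [1,2,3,1] window (alternative decomposition, not faster).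

-- ===== PORT A =====
-- The deque is kept top-first (Python's stack reversed): Python's stack[-1],[-2],[-3],[-4] are indices 0,1,2,3 here,
-- append is cons, and the four pops are `drop 4`.
def solutionStep (s : List Int × Int) (item : Int) : List Int × Int :=
  let st := item :: s.1
  if st.length ≥ 4 ∧ st[3]? = some 1 ∧ st[2]? = some 2 ∧ st[1]? = some 3 ∧ st[0]? = some 1 then
    (st.drop 4, s.2 + 1)
  else (st, s.2)

def solution (ingredient : List Int) : Int :=
  (ingredient.foldl solutionStep ([], 0)).2

-- ===== PORT B =====
-- index of the leftmost i with lst[i:i+4] == [1,2,3,1] (Source B's inner for-loop)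
def findIdx4 : List Int → Option Nat
  | [] => none
  | x :: rest =>
    if (x :: rest).take 4 = [1, 2, 3, 1] then some 0
    else (findIdx4 rest).map (· + 1)

-- (termination helper for solutionGo)
theorem findIdx4_le : ∀ (l : List Int) (j : Nat), findIdx4 l = some j → j + 4 ≤ l.length
  | [], j => by simp [findIdx4]
  | x :: rest, j => by
    simp only [findIdx4]
    split
    · rename_i h
      intro hj
      have hlen := congrArg List.length h
      simp only [List.length_take, List.length_cons] at hlen
      simp only [Option.some.injEq] at hj
      simp only [List.length_cons]
      omega
    · intro hj
      obtain ⟨j', hj', rfl⟩ := Option.map_eq_some_iff.mp hj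
      have := findIdx4_le rest j' hj'
      simp only [List.length_cons]
      omega

-- Source B's outer while-loop: delete the found window (del lst[j:j+4]) and count, until no window is found
def solutionGo (lst : List Int) (answer : Int) : Int :=
  match h : findIdx4 lst with
  | none => answer
  | some j => solutionGo (lst.take j ++ lst.drop (j + 4)) (answer + 1)
termination_by lst.length
decreasing_by
  have := findIdx4_le lst j h
  simp [List.length_take, List.length_drop]
  omega

def solution_alt (ingredient : List Int) : Int := solutionGo ingredient 0

-- ===== PRECONDITION & SPEC =====
def Spec_solution (ingredient : List Int) (out : Int) : Prop := out = solution_alt ingredient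
instance (ingredient : List Int) (out : Int) : Decidable (Spec_solution ingredient out) := by unfold Spec_solution; infer_instance

-- ===== CLAIM (what is proved, stated in full; the proofs are below) =====
def Claim_equal_solution : Prop := ∀ (ingredient : List Int), Dom_solution ingredient → Spec_solution ingredient (solution ingredient)

-- ===== LEMMAS AND PROOFS =====

-- an occurrence of the pattern makes findIdx4 succeed
theorem findIdx4_isSome_of_split : ∀ (u v : List Int), (findIdx4 (u ++ 1 :: 2 :: 3 :: 1 :: v)).isSome = true
  | [], v => by simp [findIdx4]
  | x :: u, v => by
    simp only [List.cons_append, findIdx4]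
    split
    · rfl
    · simpa using findIdx4_isSome_of_split u v

-- characterization of the leftmost occurrence
theorem findIdx4_some_split : ∀ (l : List Int) (j : Nat), findIdx4 l = some j →
    ∃ u v, l = u ++ [1, 2, 3, 1] ++ v ∧ u.length = j ∧ findIdx4 (u ++ [1, 2, 3]) = none
  | [], j => by simp [findIdx4]
  | x :: rest, j => by
    simp only [findIdx4]
    split
    · rename_i htake
      intro hj
      simp only [Option.some.injEq] at hj
      refine ⟨[], (x :: rest).drop 4, ?_, by simp [hj], by decide⟩
      conv_lhs => rw [← List.take_append_drop 4 (x :: rest)]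
      rw [htake]
      simp
    · rename_i htake
      intro hj
      obtain ⟨j', hj', rfl⟩ := Option.map_eq_some_iff.mp hj
      obtain ⟨u, v, hrest, hlen, hclean⟩ := findIdx4_some_split rest j' hj'
      refine ⟨x :: u, v, by simp [hrest], by simp [hlen], ?_⟩
      have htail : (x :: u) ++ [1, 2, 3] = x :: (u ++ [1, 2, 3]) := by simp
      rw [htail]
      simp only [findIdx4]
      rw [if_neg, hclean]
      · simp
      · intro hc
        apply htake
        have h1 : rest.take 3 = (u ++ [1, 2, 3]).take 3 := by
          rw [hrest]
          rw [show u ++ [1, 2, 3, 1] ++ v = (u ++ [1, 2, 3]) ++ (1 :: v) by simp]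
          rw [List.take_append_of_le_length (by simp)]
        rw [List.take_succ_cons] at hc ⊢
        rw [h1]
        exact hc

theorem findIdx4_none_of_append (a b : List Int) (h : findIdx4 (a ++ b) = none) : findIdx4 a = none := by
  cases ha : findIdx4 a with
  | none => rfl
  | some j =>
    obtain ⟨u, v, rfl, _, _⟩ := findIdx4_some_split a j ha
    have hocc := findIdx4_isSome_of_split u (v ++ b)
    rw [show (u ++ [1, 2, 3, 1] ++ v) ++ b = u ++ 1 :: 2 :: 3 :: 1 :: (v ++ b) by simp] at h
    simp [h] at hocc

-- the pop branch of A's step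
theorem step_pop (rest : List Int) (c : Int) : solutionStep (3 :: 2 :: 1 :: rest, c) 1 = (rest, c + 1) := by
  simp [solutionStep]

-- the push branch of A's step
theorem step_push (st : List Int) (c : Int) (x : Int)
    (h : ∀ rest, x :: st ≠ 1 :: 3 :: 2 :: 1 :: rest) : solutionStep (st, c) x = (x :: st, c) := by
  unfold solutionStep
  rw [if_neg]
  rintro ⟨hlen, h3, h2, h1, h0⟩
  rcases st with _ | ⟨a, st⟩
  · simp at hlen
  rcases st with _ | ⟨b, st⟩
  · simp at hlen
  rcases st with _ | ⟨d, st⟩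
  · simp at hlen
  simp only [List.getElem?_cons_zero, List.getElem?_cons_succ, Option.some.injEq] at h3 h2 h1 h0
  exact h st (by simp [h0, h1, h2, h3])

-- the counter is an accumulator: a shift of the counter shifts through one step
theorem step_shift (st : List Int) (c x : Int) :
    solutionStep (st, c) x = ((solutionStep (st, 0) x).1, (solutionStep (st, 0) x).2 + c) := by
  simp only [solutionStep]
  split_ifs
  · simp [Prod.ext_iff]
    omega
  · simp

-- … and through the whole fold
theorem foldl_step_shift : ∀ (l : List Int) (st : List Int) (c : Int),
    l.foldl solutionStep (st, c) = ((l.foldl solutionStep (st, 0)).1, (l.foldl solutionStep (st, 0)).2 + c)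
  | [], st, c => by simp
  | x :: l, st, c => by
    simp only [List.foldl_cons]
    rw [step_shift st c x]
    rw [foldl_step_shift l (solutionStep (st, 0) x).1 ((solutionStep (st, 0) x).2 + c)]
    rw [show solutionStep (st, 0) x = ((solutionStep (st, 0) x).1, (solutionStep (st, 0) x).2) from rfl]
    rw [foldl_step_shift l (solutionStep (st, 0) x).1 (solutionStep (st, 0) x).2]
    simp [add_assoc]

-- over a pattern-free input the stack just accumulates everything
theorem foldl_step_clean : ∀ (q p : List Int) (c : Int), findIdx4 (p ++ q) = none →
    q.foldl solutionStep (p.reverse, c) = ((p ++ q).reverse, c)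
  | [], p, c => by simp
  | x :: q, p, c => fun h => by
    simp only [List.foldl_cons]
    have hpush : solutionStep (p.reverse, c) x = (x :: p.reverse, c) := by
      apply step_push
      intro rest hc
      simp only [List.cons.injEq] at hc
      obtain ⟨hx, hp⟩ := hc
      have hp' : p = rest.reverse ++ [1, 2, 3] := by
        have := congrArg List.reverse hp
        simpa using this
      have hocc := findIdx4_isSome_of_split rest.reverse q
      rw [hp', hx] at h
      rw [show (rest.reverse ++ [1, 2, 3]) ++ 1 :: q = rest.reverse ++ 1 :: 2 :: 3 :: 1 :: q by simp] at h
      simp [h] at hocc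
    rw [hpush]
    have h2 : findIdx4 ((p ++ [x]) ++ q) = none := by
      rw [show (p ++ [x]) ++ q = p ++ x :: q by simp]
      exact h
    have hrec := foldl_step_clean q (p ++ [x]) c h2
    rw [show (p ++ [x]).reverse = x :: p.reverse by simp] at hrec
    rw [hrec]
    simp

theorem solution_of_none (l : List Int) (h : findIdx4 l = none) : solution l = 0 := by
  unfold solution
  have := foldl_step_clean l [] 0 (by simpa using h)
  simp only [List.reverse_nil, List.nil_append] at this
  rw [this]

-- key step: removing the leftmost occurrence costs A exactly one count
theorem solution_split (u v : List Int) (hclean : findIdx4 (u ++ [1, 2, 3]) = none) :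
    solution (u ++ [1, 2, 3, 1] ++ v) = solution (u ++ v) + 1 := by
  unfold solution
  rw [show u ++ [1, 2, 3, 1] ++ v = (u ++ [1, 2, 3]) ++ (1 :: v) by simp]
  rw [List.foldl_append]
  have h2 := foldl_step_clean (u ++ [1, 2, 3]) [] 0 (by simpa using hclean)
  simp only [List.reverse_nil, List.nil_append] at h2
  rw [h2]
  have hrev : (u ++ [1, 2, 3] : List Int).reverse = 3 :: 2 :: 1 :: u.reverse := by simp
  rw [hrev]
  simp only [List.foldl_cons]
  rw [step_pop u.reverse 0]
  rw [List.foldl_append]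
  have hu : findIdx4 u = none := findIdx4_none_of_append u [1, 2, 3] hclean
  have h4 := foldl_step_clean u [] 0 (by simpa using hu)
  simp only [List.reverse_nil, List.nil_append] at h4
  rw [h4]
  norm_num
  rw [foldl_step_shift v u.reverse 1]

theorem solutionGo_eq : ∀ (n : Nat) (l : List Int) (ans : Int), l.length ≤ n →
    solutionGo l ans = solution l + ans := by
  intro n
  induction n with
  | zero =>
    intro l ans hl
    have hnil : l = [] := List.eq_nil_of_length_eq_zero (by omega)
    subst hnil
    rw [solutionGo]
    simp [solution, findIdx4]
  | succ m ih =>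
    intro l ans hl
    rw [solutionGo]
    split
    · rename_i h
      rw [solution_of_none l h]
      ring
    · rename_i j h
      obtain ⟨u, v, hl', hlen, hclean⟩ := findIdx4_some_split l j h
      have hdel : l.take j ++ l.drop (j + 4) = u ++ v := by
        rw [hl']
        rw [show u ++ [1, 2, 3, 1] ++ v = u ++ ([1, 2, 3, 1] ++ v) by simp]
        rw [List.take_left' hlen]
        rw [show u ++ ([1, 2, 3, 1] ++ v) = (u ++ [1, 2, 3, 1]) ++ v by simp]
        rw [List.drop_left' (by simp [hlen])]
      have hlength : (u ++ v).length ≤ m := by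
        have := congrArg List.length hl'
        simp at this
        simp
        omega
      rw [hdel, ih (u ++ v) (ans + 1) hlength]
      rw [hl', solution_split u v hclean]
      ring

-- ===== VERDICT (by name: the statement is the Claim_ definition above) =====
theorem solution_spec : Claim_equal_solution := by
  intro l _
  unfold Spec_solution solution_alt
  rw [solutionGo_eq l.length l 0 (le_refl _)]
  ring
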